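-- pv_equiv track=rewrite | github.com/DongusJr/Verkefni_HR_2019_Haust | Skilaverkefni/Skilaverkefni_9_paragraph_analysis/paragraph_analysis.py | get_sorted_paragraph_index
-- ===== SOURCE A (Python) =====
-- def get_sorted_paragraph_index(word_list):
--     ''' Function that takes in the word list and returns a dictionary that tells you what paragraph each word was in '''
--     paragraph_index_dict = {}
--     paragraph_number = 1  # Start at paragraph number 1
--     for word in word_list:
--         if word == "\n":  # New paragraph
--             paragraph_number += 1
--             continue
--         if word in paragraph_index_dict:
--             paragraph_index_dict[word].add(paragraph_number) # This is a set so it wont double count any paragraph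
--         else:
--             paragraph_index_dict[word] = {paragraph_number}  # If we haven't found this word already then add it and save paragraph in a set
--     return paragraph_index_dict
-- ===== SOURCE B (Python) =====
-- def get_sorted_paragraph_index(word_list):
--     ''' Group the words into paragraphs first, then index each paragraph's words. '''
--     done, current = [], []
--     for word in word_list:
--         if word == "\n":
--             done.append(current)
--             current = []
--         else:
--             current.append(word)
--     paragraphs = done + [current]
--     result = {}
--     for i, para in enumerate(paragraphs, start=1):
--         for word in para:
--             s = result.get(word, set())
--             s.add(i)
--             result[word] = s
--     return result
-- ===== Notes on version B (the rewrite author's own statement) =====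
-- stated objective: alternative
-- what changed: Replaces the single pass with a running paragraph counter by a two-phase decomposition: first split the word list into paragraph groups at newline markers, then a nested loop over enumerate(paragraphs, 1) records each word's paragraph number via get/insert instead of the in-dict membership branch.
import Mathlib
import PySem

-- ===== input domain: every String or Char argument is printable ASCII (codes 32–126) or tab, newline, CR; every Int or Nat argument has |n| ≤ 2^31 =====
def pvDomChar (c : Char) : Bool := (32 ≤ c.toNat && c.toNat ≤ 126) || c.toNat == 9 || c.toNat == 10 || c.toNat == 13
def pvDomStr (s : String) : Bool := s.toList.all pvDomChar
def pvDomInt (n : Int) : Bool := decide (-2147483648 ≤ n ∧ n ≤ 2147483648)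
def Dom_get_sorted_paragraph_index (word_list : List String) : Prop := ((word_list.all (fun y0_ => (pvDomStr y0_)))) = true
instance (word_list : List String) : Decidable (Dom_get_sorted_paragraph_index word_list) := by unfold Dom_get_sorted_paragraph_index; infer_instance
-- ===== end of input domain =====

-- B groups the words into paragraphs first and then indexes them with a nested loop,
-- instead of A's single pass with a running paragraph counter; same cost, different decomposition.

-- ===== PORT A =====
-- loop body of A's single pass: state = (paragraph_index_dict, paragraph_number)
def pvStepA (st : PySem.Dict String (List Int) × Int) (word : String) :
    PySem.Dict String (List Int) × Int :=
  if word = "\n" then (st.1, st.2 + 1)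
  else if st.1.contains word then
    (st.1.modify word PySem.Set.empty (fun s => PySem.Set.add s st.2), st.2)
  else
    (st.1.insert word (PySem.Set.ofList [st.2]), st.2)

def get_sorted_paragraph_index (word_list : List String) : List (String × List Int) :=
  (word_list.foldl pvStepA (PySem.Dict.empty, 1)).1.items

-- ===== PORT B =====
-- phase 1 loop body: state = (done, current); a "\n" closes the current paragraph
def pvSplitStep (st : List (List String) × List String) (word : String) :
    List (List String) × List String :=
  if word = "\n" then (st.1 ++ [st.2], []) else (st.1, st.2 ++ [word])

-- phase 2 loop body: state = (result, i); records paragraph i for every word of para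
def pvParaStep (st : PySem.Dict String (List Int) × Int) (para : List String) :
    PySem.Dict String (List Int) × Int :=
  (para.foldl (fun d w => d.insert w (PySem.Set.add (d.getD w PySem.Set.empty) st.2)) st.1,
   st.2 + 1)

def get_sorted_paragraph_index_alt (word_list : List String) : List (String × List Int) :=
  let sp := word_list.foldl pvSplitStep ([], [])
  let paragraphs := sp.1 ++ [sp.2]
  (paragraphs.foldl pvParaStep (PySem.Dict.empty, 1)).1.items

-- ===== PRECONDITION & SPEC =====
def Spec_get_sorted_paragraph_index (word_list : List String) (out : List (String × List Int)) : Prop := out = get_sorted_paragraph_index_alt word_list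
instance (word_list : List String) (out : List (String × List Int)) : Decidable (Spec_get_sorted_paragraph_index word_list out) := by unfold Spec_get_sorted_paragraph_index; infer_instance

-- ===== CLAIM (what is proved, stated in full; the proofs are below) =====
def Claim_equal_get_sorted_paragraph_index : Prop := ∀ (word_list : List String), Dom_get_sorted_paragraph_index word_list → Spec_get_sorted_paragraph_index word_list (get_sorted_paragraph_index word_list)

-- ===== LEMMAS AND PROOFS =====

-- A's two dict branches both amount to B's get/add/insert update
lemma pvStepA_eq (st : PySem.Dict String (List Int) × Int) (w : String) :
    pvStepA st w =
      if w = "\n" then (st.1, st.2 + 1)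
      else (st.1.insert w (PySem.Set.add (st.1.getD w PySem.Set.empty) st.2), st.2) := by
  unfold pvStepA
  by_cases hnl : w = "\n"
  · simp [hnl]
  · simp only [hnl, if_false]
    by_cases hc : st.1.contains w
    · simp [hc, PySem.Dict.modify]
    · simp only [hc, Bool.false_eq_true, if_false]
      rw [PySem.Dict.getD_of_not_contains (h := by simpa using hc)]
      simp [PySem.Set.ofList, PySem.Set.add, PySem.Set.empty, PySem.Set.contains]

-- the split fold only ever appends to the `done` component
lemma pvSplit_shift (ws : List String) : ∀ (ps : List (List String)) (c : List String),
    ws.foldl pvSplitStep (ps, c) =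
      (ps ++ (ws.foldl pvSplitStep ([], c)).1, (ws.foldl pvSplitStep ([], c)).2) := by
  induction ws with
  | nil => intro ps c; simp
  | cons w ws ih =>
      intro ps c
      by_cases hnl : w = "\n"
      · simp only [List.foldl_cons, pvSplitStep, hnl, if_true, List.nil_append]
        rw [ih (ps ++ [c]) [], ih [c] []]
        simp
      · simp only [List.foldl_cons, pvSplitStep, hnl, if_false]
        exact ih ps (c ++ [w])

-- main invariant: A's pass from a partially-processed current paragraph c equals
-- B's nested fold over the remaining grouping of c ++ ws
lemma pv_main (ws : List String) : ∀ (c : List String) (d : PySem.Dict String (List Int)) (n : Int),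
    (ws.foldl pvStepA
        (c.foldl (fun d w => d.insert w (PySem.Set.add (d.getD w PySem.Set.empty) n)) d, n)).1 =
      ((((ws.foldl pvSplitStep ([], c)).1 ++ [(ws.foldl pvSplitStep ([], c)).2]).foldl
          pvParaStep (d, n))).1 := by
  induction ws with
  | nil =>
      intro c d n
      simp [pvParaStep]
  | cons w ws ih =>
      intro c d n
      by_cases hnl : w = "\n"
      · simp only [List.foldl_cons, pvStepA_eq, hnl, if_true, pvSplitStep, List.nil_append]
        rw [pvSplit_shift ws [c] []]
        simp only [List.append_assoc, List.singleton_append, List.cons_append]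
        rw [List.foldl_cons]
        have hps : pvParaStep (d, n) c =
            (c.foldl (fun d w => d.insert w (PySem.Set.add (d.getD w PySem.Set.empty) n)) d, n + 1) := rfl
        rw [hps]
        have := ih [] (c.foldl (fun d w => d.insert w (PySem.Set.add (d.getD w PySem.Set.empty) n)) d) (n + 1)
        simpa using this
      · simp only [List.foldl_cons, pvStepA_eq, hnl, if_false, pvSplitStep]
        have := ih (c ++ [w]) d n
        simpa [List.foldl_append] using this

-- ===== VERDICT (by name: the statement is the Claim_ definition above) =====
theorem get_sorted_paragraph_index_spec : Claim_equal_get_sorted_paragraph_index := by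
  intro word_list _
  unfold Spec_get_sorted_paragraph_index get_sorted_paragraph_index get_sorted_paragraph_index_alt
  exact congrArg PySem.Dict.items (pv_main word_list [] PySem.Dict.empty 1)
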